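-- pv_equiv track=rewrite | github.com/ArcProjet/ARC | primitive.py | growingColor8
-- ===== SOURCE A (Python) =====
-- def gridCopy(grid):
--     res = [[0 for _ in range(len(grid[0]))] for _ in range(len(grid))]
--     for i in range(0, len(grid)):
--         for j in range(0, len(grid[i])):
--             res[i][j] = grid[i][j]
--     return res
--
-- def growingColor8(grid):
--     res = gridCopy(grid)
--     for i in range(1, len(grid)):
--         for j in range(len(grid[0])):
--             if (grid[i][j] == 8):
--                 res[i - 1][j] = 8
--     for k in range(0, len(grid)):
--         for l in range(len(grid[0]) - 2, -1, -1):
--             if (grid[k][l] == 8):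
--                 res[k][l + 1] = 8
--     for m in range(len(grid) - 2, -1, -1):
--         for n in range(len(grid[0])):
--             if (grid[m][n] == 8):
--                 res[m + 1][n] = 8
--     for o in range(len(grid)):
--         for p in range(1, len(grid[0])):
--             if (grid[o][p] == 8):
--                 res[o][p - 1] = 8
--     return res
-- ===== SOURCE B (Python) =====
-- def growingColor8(grid):
--     h = len(grid)
--     w = len(grid[0]) if grid else 0
--     return [[8 if (grid[i][j] == 8
--                    or (i > 0 and grid[i - 1][j] == 8)
--                    or (i < h - 1 and grid[i + 1][j] == 8)
--                    or (j > 0 and grid[i][j - 1] == 8)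
--                    or (j < w - 1 and grid[i][j + 1] == 8))
--              else grid[i][j]
--              for j in range(w)]
--             for i in range(h)]
-- ===== Notes on version B (the rewrite author's own statement) =====
-- stated objective: alternative
-- what changed: A scatters: copies the grid and runs four directional write-passes pushing 8 into neighbors; B gathers: builds the result in one pointwise comprehension, each cell checking its own four in-bounds neighbors (and itself) for an 8.
import Mathlib
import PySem

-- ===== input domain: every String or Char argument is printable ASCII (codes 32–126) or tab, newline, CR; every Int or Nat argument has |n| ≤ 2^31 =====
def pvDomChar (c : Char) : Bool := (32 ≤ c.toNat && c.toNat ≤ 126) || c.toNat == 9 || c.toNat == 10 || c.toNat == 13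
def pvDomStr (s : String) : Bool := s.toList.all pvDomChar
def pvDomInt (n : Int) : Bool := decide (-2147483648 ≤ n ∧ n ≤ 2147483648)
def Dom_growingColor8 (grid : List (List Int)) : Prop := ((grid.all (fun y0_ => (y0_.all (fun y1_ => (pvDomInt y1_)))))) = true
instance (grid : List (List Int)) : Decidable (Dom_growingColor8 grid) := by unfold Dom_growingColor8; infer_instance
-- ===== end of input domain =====

-- B replaces A's four directional scatter passes by one gather pass: each output cell
-- checks itself and its in-bounds orthogonal neighbours for an 8 (alternative decomposition, same cost).

-- ===== PORT A =====
-- res[i][j] = v  (hand port of Python item assignment via pySetD; exact where the indices are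
-- in range, which holds for every write A performs on inputs admitted by Pre_)
def pvSet2 (res : List (List Int)) (i j v : Int) : List (List Int) :=
  PySem.List.pySetD res i (PySem.List.pySetD (PySem.List.pyGetD res i []) j v)

def pvGridCopy (grid : List (List Int)) : List (List Int) :=
  let res := (PySem.List.pyRange 0 (PySem.List.len grid) 1).map (fun _ =>
    (PySem.List.pyRange 0 (PySem.List.len (PySem.List.pyGetD grid 0 [])) 1).map (fun _ => (0 : Int)))
  (PySem.List.pyRange 0 (PySem.List.len grid) 1).foldl (fun res i =>
    (PySem.List.pyRange 0 (PySem.List.len (PySem.List.pyGetD grid i [])) 1).foldl (fun res j =>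
      pvSet2 res i j (PySem.List.pyGetD (PySem.List.pyGetD grid i []) j 0)) res) res

def growingColor8 (grid : List (List Int)) : List (List Int) :=
  let res := pvGridCopy grid
  let res := (PySem.List.pyRange 1 (PySem.List.len grid) 1).foldl (fun res i =>
    (PySem.List.pyRange 0 (PySem.List.len (PySem.List.pyGetD grid 0 [])) 1).foldl (fun res j =>
      if PySem.List.pyGetD (PySem.List.pyGetD grid i []) j 0 = 8 then pvSet2 res (i - 1) j 8 else res) res) res
  let res := (PySem.List.pyRange 0 (PySem.List.len grid) 1).foldl (fun res k =>
    (PySem.List.pyRange (PySem.List.len (PySem.List.pyGetD grid 0 []) - 2) (-1) (-1)).foldl (fun res l =>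
      if PySem.List.pyGetD (PySem.List.pyGetD grid k []) l 0 = 8 then pvSet2 res k (l + 1) 8 else res) res) res
  let res := (PySem.List.pyRange (PySem.List.len grid - 2) (-1) (-1)).foldl (fun res m =>
    (PySem.List.pyRange 0 (PySem.List.len (PySem.List.pyGetD grid 0 [])) 1).foldl (fun res n =>
      if PySem.List.pyGetD (PySem.List.pyGetD grid m []) n 0 = 8 then pvSet2 res (m + 1) n 8 else res) res) res
  (PySem.List.pyRange 0 (PySem.List.len grid) 1).foldl (fun res o =>
    (PySem.List.pyRange 1 (PySem.List.len (PySem.List.pyGetD grid 0 [])) 1).foldl (fun res p =>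
      if PySem.List.pyGetD (PySem.List.pyGetD grid o []) p 0 = 8 then pvSet2 res o (p - 1) 8 else res) res) res

-- ===== PORT B =====
def growingColor8_alt (grid : List (List Int)) : List (List Int) :=
  let h := PySem.List.len grid
  let w := if grid = [] then 0 else PySem.List.len (PySem.List.pyGetD grid 0 [])
  (PySem.List.pyRange 0 h 1).map (fun i =>
    (PySem.List.pyRange 0 w 1).map (fun j =>
      if PySem.List.pyGetD (PySem.List.pyGetD grid i []) j 0 = 8
         ∨ (0 < i ∧ PySem.List.pyGetD (PySem.List.pyGetD grid (i - 1) []) j 0 = 8)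
         ∨ (i < h - 1 ∧ PySem.List.pyGetD (PySem.List.pyGetD grid (i + 1) []) j 0 = 8)
         ∨ (0 < j ∧ PySem.List.pyGetD (PySem.List.pyGetD grid i []) (j - 1) 0 = 8)
         ∨ (j < w - 1 ∧ PySem.List.pyGetD (PySem.List.pyGetD grid i []) (j + 1) 0 = 8)
      then (8 : Int) else PySem.List.pyGetD (PySem.List.pyGetD grid i []) j 0))

-- ===== PRECONDITION & SPEC =====
-- Pre_ excludes exactly the inputs on which A raises IndexError: ragged grids (a row whose
-- length differs from the first row's).  A returns on every rectangular grid, the empty grid included.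
def Pre_growingColor8 (grid : List (List Int)) : Prop :=
  ∀ row ∈ grid, row.length = (grid.headD []).length
instance (grid : List (List Int)) : Decidable (Pre_growingColor8 grid) := by
  unfold Pre_growingColor8; infer_instance
def pvWitness_growingColor8 : List (List Int) := [[8, 0], [0, 0]]

def Spec_growingColor8 (grid : List (List Int)) (out : List (List Int)) : Prop := out = growingColor8_alt grid
instance (grid : List (List Int)) (out : List (List Int)) : Decidable (Spec_growingColor8 grid out) := by unfold Spec_growingColor8; infer_instance

-- ===== CLAIM (what is proved, stated in full; the proofs are below) =====
def Claim_equal_growingColor8 : Prop := ∀ (grid : List (List Int)), Dom_growingColor8 grid → Pre_growingColor8 grid → Spec_growingColor8 grid (growingColor8 grid)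

-- ===== LEMMAS AND PROOFS =====

-- Nat-indexed write and read used by the proofs
def pvSetN (res : List (List Int)) (a b : Nat) (v : Int) : List (List Int) :=
  res.set a ((res.getD a []).set b v)
def pvCell (g : List (List Int)) (r c : Nat) : Int := (g.getD r []).getD c 0

theorem pvSet2_natCast (res : List (List Int)) (a b : Nat) (v : Int) :
    pvSet2 res (a : Int) (b : Int) v = pvSetN res a b v := by
  simp [pvSet2, pvSetN]

theorem length_pvSetN (res : List (List Int)) (a b : Nat) (v : Int) :
    (pvSetN res a b v).length = res.length := by simp [pvSetN]

theorem getD_row_pvSetN (res : List (List Int)) (a b : Nat) (v : Int) (r : Nat) :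
    (pvSetN res a b v).getD r [] =
      if a = r ∧ a < res.length then (res.getD a []).set b v else res.getD r [] := by
  simp only [pvSetN, List.getD_eq_getElem?_getD, List.getElem?_set]
  by_cases h1 : a = r
  · subst h1
    by_cases h2 : a < res.length
    · simp [h2]
    · simp [h2]
  · simp [h1]

theorem rowlen_pvSetN (res : List (List Int)) (a b : Nat) (v : Int) (r : Nat) :
    ((pvSetN res a b v).getD r []).length = (res.getD r []).length := by
  rw [getD_row_pvSetN]
  split_ifs with h
  · simp [h.1]
  · rfl

theorem getD_set_int (row : List Int) (b c : Nat) (v : Int) :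
    (row.set b v).getD c 0 = if b = c ∧ b < row.length then v else row.getD c 0 := by
  simp only [List.getD_eq_getElem?_getD, List.getElem?_set]
  by_cases h1 : b = c
  · subst h1
    by_cases h2 : b < row.length
    · simp [h2]
    · simp [h2]
  · simp [h1]

theorem cell_pvSetN (res : List (List Int)) (a b : Nat) (v : Int) (r c : Nat) :
    pvCell (pvSetN res a b v) r c =
      if a = r ∧ b = c ∧ a < res.length ∧ b < (res.getD a []).length then v
      else pvCell res r c := by
  simp only [pvCell, getD_row_pvSetN]
  by_cases h1 : a = r ∧ a < res.length
  · obtain ⟨ha, hlen⟩ := h1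
    subst ha
    rw [if_pos ⟨rfl, hlen⟩, getD_set_int]
    by_cases h2 : b = c ∧ b < (res.getD a []).length
    · rw [if_pos h2, if_pos ⟨rfl, h2.1, hlen, h2.2⟩]
    · rw [if_neg h2, if_neg (fun h => h2 ⟨h.2.1, h.2.2.2⟩)]
  · rw [if_neg h1, if_neg (fun h => h1 ⟨h.1, h.2.2.1⟩)]

-- inner loop: a fold of conditional constant-8 writes; shape is preserved
theorem innerfold_shape {β : Type} (L : List β) (cond : β → Prop) [DecidablePred cond]
    (ti tj : β → Int) (hnn : ∀ b ∈ L, cond b → 0 ≤ ti b ∧ 0 ≤ tj b)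
    (res : List (List Int)) :
    (L.foldl (fun res b => if cond b then pvSet2 res (ti b) (tj b) 8 else res) res).length
        = res.length ∧
    ∀ r, ((L.foldl (fun res b => if cond b then pvSet2 res (ti b) (tj b) 8 else res) res).getD r []).length
        = (res.getD r []).length := by
  induction L generalizing res with
  | nil => simp
  | cons a L ih =>
    simp only [List.foldl_cons]
    have ihL := ih (fun b hb => hnn b (List.mem_cons_of_mem a hb))
    by_cases hc : cond a
    · have hnn' := hnn a (List.mem_cons_self) hc
      rw [if_pos hc]
      have hset : pvSet2 res (ti a) (tj a) 8 = pvSetN res (ti a).toNat (tj a).toNat 8 := by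
        rw [← pvSet2_natCast]; congr 1 <;> omega
      rw [hset]
      have hstep := ihL (pvSetN res (ti a).toNat (tj a).toNat 8)
      refine ⟨by rw [hstep.1, length_pvSetN], fun r => by rw [hstep.2 r, rowlen_pvSetN]⟩
    · rw [if_neg hc]
      exact ihL res

-- inner loop: the resulting cell is 8 exactly when some admitted write targets it
theorem innerfold_cell {β : Type} (L : List β) (cond : β → Prop) [DecidablePred cond]
    (ti tj : β → Int) (hnn : ∀ b ∈ L, cond b → 0 ≤ ti b ∧ 0 ≤ tj b)
    (res : List (List Int)) (r c : Nat) :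
    pvCell (L.foldl (fun res b => if cond b then pvSet2 res (ti b) (tj b) 8 else res) res) r c =
      if (∃ b ∈ L, cond b ∧ ti b = (r : Int) ∧ tj b = (c : Int)) ∧
          r < res.length ∧ c < (res.getD r []).length then 8
      else pvCell res r c := by
  induction L generalizing res with
  | nil => simp
  | cons a L ih =>
    simp only [List.foldl_cons, List.exists_mem_cons_iff]
    have ihL := ih (fun b hb => hnn b (List.mem_cons_of_mem a hb))
    by_cases hc : cond a
    · have hnn' := hnn a (List.mem_cons_self) hc
      rw [if_pos hc]
      have hset : pvSet2 res (ti a) (tj a) 8 = pvSetN res (ti a).toNat (tj a).toNat 8 := by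
        rw [← pvSet2_natCast]; congr 1 <;> omega
      rw [hset, ihL, length_pvSetN, rowlen_pvSetN, cell_pvSetN]
      by_cases hB : r < res.length ∧ c < (res.getD r []).length
      · by_cases hE : ∃ b ∈ L, cond b ∧ ti b = (r : Int) ∧ tj b = (c : Int)
        · rw [if_pos ⟨hE, hB⟩, if_pos ⟨Or.inr hE, hB⟩]
        · rw [if_neg (fun h => hE h.1)]
          by_cases hA : (ti a).toNat = r ∧ (tj a).toNat = c
          · rw [if_pos ⟨hA.1, hA.2, hA.1 ▸ hB.1, by rw [hA.1, hA.2]; exact hB.2⟩,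
              if_pos ⟨Or.inl ⟨hc, by omega, by omega⟩, hB⟩]
          · have hn2 : ¬(((cond a ∧ ti a = (r : Int) ∧ tj a = (c : Int)) ∨
                ∃ b ∈ L, cond b ∧ ti b = (r : Int) ∧ tj b = (c : Int)) ∧
                r < res.length ∧ c < (res.getD r []).length) := by
              rintro ⟨⟨-, hti, htj⟩ | hE', -⟩
              · exact hA ⟨by omega, by omega⟩
              · exact hE hE'
            rw [if_neg (fun h => hA ⟨h.1, h.2.1⟩), if_neg hn2]
      · have hn1 : ¬((ti a).toNat = r ∧ (tj a).toNat = c ∧ (ti a).toNat < res.length ∧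
            (tj a).toNat < (res.getD (ti a).toNat []).length) := by
          rintro ⟨hh1, hh2, hh3, hh4⟩
          subst hh1; subst hh2
          exact hB ⟨hh3, hh4⟩
        rw [if_neg (fun h => hB h.2), if_neg hn1, if_neg (fun h => hB h.2)]
    · rw [if_neg hc, ihL]
      by_cases hB : r < res.length ∧ c < (res.getD r []).length
      · by_cases hE : ∃ b ∈ L, cond b ∧ ti b = (r : Int) ∧ tj b = (c : Int)
        · rw [if_pos ⟨hE, hB⟩, if_pos ⟨Or.inr hE, hB⟩]
        · have hn2 : ¬(((cond a ∧ ti a = (r : Int) ∧ tj a = (c : Int)) ∨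
              ∃ b ∈ L, cond b ∧ ti b = (r : Int) ∧ tj b = (c : Int)) ∧
              r < res.length ∧ c < (res.getD r []).length) := by
            rintro ⟨h | hE', -⟩
            · exact hc h.1
            · exact hE hE'
          rw [if_neg (fun h => hE h.1), if_neg hn2]
      · rw [if_neg (fun h => hB h.2), if_neg (fun h => hB h.2)]

-- a directional pass: fold over rows of folds over columns of conditional constant-8 writes
theorem nestedfold_shape {α β : Type} (L1 : List α) (L2 : List β) (cond : α → β → Prop)
    [∀ a b, Decidable (cond a b)] (ti tj : α → β → Int)
    (hnn : ∀ a ∈ L1, ∀ b ∈ L2, cond a b → 0 ≤ ti a b ∧ 0 ≤ tj a b)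
    (res : List (List Int)) :
    (L1.foldl (fun res a => L2.foldl (fun res b => if cond a b then pvSet2 res (ti a b) (tj a b) 8 else res) res) res).length
        = res.length ∧
    ∀ r, ((L1.foldl (fun res a => L2.foldl (fun res b => if cond a b then pvSet2 res (ti a b) (tj a b) 8 else res) res) res).getD r []).length
        = (res.getD r []).length := by
  induction L1 generalizing res with
  | nil => simp
  | cons a L1 ih =>
    simp only [List.foldl_cons]
    have hstep := innerfold_shape L2 (cond a) (ti a) (tj a)
      (fun b hb => hnn a (List.mem_cons_self) b hb) res
    have hrest := ih (fun a' ha' b hb => hnn a' (List.mem_cons_of_mem a ha') b hb)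
      (L2.foldl (fun res b => if cond a b then pvSet2 res (ti a b) (tj a b) 8 else res) res)
    exact ⟨by rw [hrest.1, hstep.1], fun r => by rw [hrest.2 r, hstep.2 r]⟩

theorem nestedfold_cell {α β : Type} (L1 : List α) (L2 : List β) (cond : α → β → Prop)
    [∀ a b, Decidable (cond a b)] (ti tj : α → β → Int)
    (hnn : ∀ a ∈ L1, ∀ b ∈ L2, cond a b → 0 ≤ ti a b ∧ 0 ≤ tj a b)
    (res : List (List Int)) (r c : Nat) :
    pvCell (L1.foldl (fun res a => L2.foldl (fun res b => if cond a b then pvSet2 res (ti a b) (tj a b) 8 else res) res) res) r c =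
      if (∃ a ∈ L1, ∃ b ∈ L2, cond a b ∧ ti a b = (r : Int) ∧ tj a b = (c : Int)) ∧
          r < res.length ∧ c < (res.getD r []).length then 8
      else pvCell res r c := by
  induction L1 generalizing res with
  | nil => simp
  | cons a L1 ih =>
    simp only [List.foldl_cons, List.exists_mem_cons_iff]
    have hstep := innerfold_shape L2 (cond a) (ti a) (tj a)
      (fun b hb => hnn a (List.mem_cons_self) b hb) res
    rw [ih (fun a' ha' b hb => hnn a' (List.mem_cons_of_mem a ha') b hb),
      hstep.1, hstep.2 r,
      innerfold_cell L2 (cond a) (ti a) (tj a) (fun b hb => hnn a (List.mem_cons_self) b hb)]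
    by_cases hB : r < res.length ∧ c < (res.getD r []).length
    · by_cases hE : ∃ a' ∈ L1, ∃ b ∈ L2, cond a' b ∧ ti a' b = (r : Int) ∧ tj a' b = (c : Int)
      · rw [if_pos ⟨hE, hB⟩, if_pos ⟨Or.inr hE, hB⟩]
      · rw [if_neg (fun h => hE h.1)]
        by_cases hA : ∃ b ∈ L2, cond a b ∧ ti a b = (r : Int) ∧ tj a b = (c : Int)
        · rw [if_pos ⟨hA, hB⟩, if_pos ⟨Or.inl hA, hB⟩]
        · have hn2 : ¬(((∃ b ∈ L2, cond a b ∧ ti a b = (r : Int) ∧ tj a b = (c : Int)) ∨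
              ∃ a' ∈ L1, ∃ b ∈ L2, cond a' b ∧ ti a' b = (r : Int) ∧ tj a' b = (c : Int)) ∧
              r < res.length ∧ c < (res.getD r []).length) := by
            rintro ⟨h | h, -⟩
            · exact hA h
            · exact hE h
          rw [if_neg (fun h => hA h.1), if_neg hn2]
    · rw [if_neg (fun h => hB h.2), if_neg (fun h => hB h.2), if_neg (fun h => hB h.2)]

-- ---------- gridCopy: the copy loop rebuilds exactly the input grid ----------

theorem set_getD_self (res : List (List Int)) (i : Nat) (hi : i < res.length) :
    res.set i (res.getD i []) = res := by
  rw [List.getD_eq_getElem?_getD, List.getElem?_eq_getElem hi, Option.getD_some]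
  exact List.set_getElem_self hi

theorem foldl_pvSetN_row {β : Type} (L : List β) (f : β → Nat) (g : β → Int) :
    ∀ (res : List (List Int)) (i : Nat), i < res.length →
      L.foldl (fun res b => pvSetN res i (f b) (g b)) res
        = res.set i (L.foldl (fun row b => row.set (f b) (g b)) (res.getD i [])) := by
  induction L with
  | nil =>
    intro res i hi
    simp only [List.foldl_nil]
    exact (set_getD_self res i hi).symm
  | cons a L ih =>
    intro res i hi
    simp only [List.foldl_cons]
    rw [ih (pvSetN res i (f a) (g a)) i (by rw [length_pvSetN]; exact hi),
      getD_row_pvSetN, if_pos ⟨rfl, hi⟩]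
    simp only [pvSetN, List.set_set]

theorem foldl_set_range (g : Nat → Int) (n : Nat) :
    ∀ (row : List Int), n ≤ row.length →
      (List.range n).foldl (fun row j => row.set j (g j)) row
        = (List.range n).map g ++ row.drop n := by
  induction n with
  | zero => intro row h; simp
  | succ n ih =>
    intro row h
    rw [List.range_succ, List.foldl_append, ih row (by omega)]
    simp only [List.foldl_cons, List.foldl_nil]
    have hn : n < row.length := by omega
    have hdrop : row.drop n = row[n] :: row.drop (n + 1) := List.drop_eq_getElem_cons hn
    have hlen : ((List.range n).map g).length = n := by simp
    rw [hdrop, List.set_append_right _ _ (by omega), hlen, Nat.sub_self, List.set_cons_zero]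
    simp

theorem row_eq_map_getD (row : List Int) :
    (List.range row.length).map (fun c => row.getD c 0) = row := by
  apply List.ext_getElem (by simp)
  intro i h1 h2
  simp [List.getD_eq_getElem?_getD, List.getElem?_eq_getElem h2]

theorem copy_prefix (grid res0 : List (List Int)) (hlen : res0.length = grid.length)
    (hroweq : ∀ t, t < grid.length → (res0.getD t []).length = (grid.getD t []).length) :
    ∀ t, t ≤ grid.length →
      (List.range t).foldl (fun res i => (List.range (grid.getD i []).length).foldl
          (fun res j => pvSetN res i j ((grid.getD i []).getD j 0)) res) res0
        = grid.take t ++ res0.drop t := by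
  intro t
  induction t with
  | zero => simp
  | succ t ih =>
    intro ht
    have ht' : t < grid.length := by omega
    rw [List.range_succ, List.foldl_append, ih (by omega)]
    simp only [List.foldl_cons, List.foldl_nil]
    set res := grid.take t ++ res0.drop t with hres
    have htk : (grid.take t).length = t := by simp; omega
    have hreslen : res.length = grid.length := by
      rw [hres]; simp; omega
    have hresrow : res.getD t [] = res0.getD t [] := by
      rw [hres, List.getD_eq_getElem?_getD, List.getD_eq_getElem?_getD,
        List.getElem?_append_right (by rw [htk]), htk, Nat.sub_self, List.getElem?_drop,
        Nat.add_zero]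
    rw [foldl_pvSetN_row _ _ _ res t (by rw [hreslen]; omega), hresrow,
      foldl_set_range _ _ _ (hroweq t ht').ge,
      List.drop_of_length_le (by rw [hroweq t ht']), List.append_nil, row_eq_map_getD]
    have hgt : grid.getD t [] = grid[t] := by
      rw [List.getD_eq_getElem?_getD, List.getElem?_eq_getElem ht', Option.getD_some]
    have hd : res0.drop t = res0[t] :: res0.drop (t + 1) :=
      List.drop_eq_getElem_cons (by omega)
    rw [hres, hd, List.set_append_right _ _ (by rw [htk]), htk, Nat.sub_self,
      List.set_cons_zero, hgt]
    have htake : grid.take (t + 1) = grid.take t ++ [grid[t]] := by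
      rw [List.take_add_one, List.getElem?_eq_getElem ht']
      rfl
    rw [htake, List.append_assoc, List.singleton_append]

theorem pre_rowlen (grid : List (List Int)) (hpre : Pre_growingColor8 grid)
    (t : Nat) (ht : t < grid.length) :
    (grid.getD t []).length = (grid.getD 0 []).length := by
  cases grid with
  | nil => simp at ht
  | cons g gs =>
    have h1 := hpre ((g :: gs).getD t []) (by
      rw [List.getD_eq_getElem?_getD, List.getElem?_eq_getElem ht]
      exact List.getElem_mem ht)
    simpa using h1

theorem pvGridCopy_eq (grid : List (List Int)) (hpre : Pre_growingColor8 grid) :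
    pvGridCopy grid = grid := by
  unfold pvGridCopy
  simp only [PySem.List.len_eq, PySem.List.pyGetD_zero, PySem.List.pyRange_zero_nat,
    List.foldl_map, List.map_map, PySem.List.pyGetD_natCast, pvSet2_natCast,
    Function.comp_def]
  set res0 := (List.range grid.length).map
    (fun _ => (List.range (grid.getD 0 []).length).map (fun _ => (0 : Int))) with hres0
  have hlen : res0.length = grid.length := by simp [hres0]
  have hrow0 : ∀ t, t < grid.length →
      (res0.getD t []).length = (grid.getD t []).length := by
    intro t ht
    have : res0.getD t [] = (List.range (grid.getD 0 []).length).map (fun _ => (0 : Int)) := by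
      rw [hres0, List.getD_eq_getElem?_getD, List.getElem?_map]
      simp [ht]
    rw [this, List.length_map, List.length_range]
    exact (pre_rowlen grid hpre t ht).symm
  have := copy_prefix grid res0 hlen hrow0 grid.length (le_refl _)
  rw [this]
  simp [hlen]

-- ---------- the four directional passes of A ----------

def pvPass1 (grid res : List (List Int)) : List (List Int) :=
  (PySem.List.pyRange 1 (PySem.List.len grid) 1).foldl (fun res i =>
    (PySem.List.pyRange 0 (PySem.List.len (PySem.List.pyGetD grid 0 [])) 1).foldl (fun res j =>
      if PySem.List.pyGetD (PySem.List.pyGetD grid i []) j 0 = 8 then pvSet2 res (i - 1) j 8 else res) res) res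

def pvPass2 (grid res : List (List Int)) : List (List Int) :=
  (PySem.List.pyRange 0 (PySem.List.len grid) 1).foldl (fun res k =>
    (PySem.List.pyRange (PySem.List.len (PySem.List.pyGetD grid 0 []) - 2) (-1) (-1)).foldl (fun res l =>
      if PySem.List.pyGetD (PySem.List.pyGetD grid k []) l 0 = 8 then pvSet2 res k (l + 1) 8 else res) res) res

def pvPass3 (grid res : List (List Int)) : List (List Int) :=
  (PySem.List.pyRange (PySem.List.len grid - 2) (-1) (-1)).foldl (fun res m =>
    (PySem.List.pyRange 0 (PySem.List.len (PySem.List.pyGetD grid 0 [])) 1).foldl (fun res n =>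
      if PySem.List.pyGetD (PySem.List.pyGetD grid m []) n 0 = 8 then pvSet2 res (m + 1) n 8 else res) res) res

def pvPass4 (grid res : List (List Int)) : List (List Int) :=
  (PySem.List.pyRange 0 (PySem.List.len grid) 1).foldl (fun res o =>
    (PySem.List.pyRange 1 (PySem.List.len (PySem.List.pyGetD grid 0 [])) 1).foldl (fun res p =>
      if PySem.List.pyGetD (PySem.List.pyGetD grid o []) p 0 = 8 then pvSet2 res o (p - 1) 8 else res) res) res

theorem growingColor8_eq (grid : List (List Int)) :
    growingColor8 grid = pvPass4 grid (pvPass3 grid (pvPass2 grid (pvPass1 grid (pvGridCopy grid)))) := rfl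

theorem pass1_shape (grid res : List (List Int)) :
    (pvPass1 grid res).length = res.length ∧
      ∀ r, ((pvPass1 grid res).getD r []).length = (res.getD r []).length := by
  unfold pvPass1
  exact nestedfold_shape _ _ _ _ _ (by
    intro i hi j hj _
    rw [PySem.List.mem_pyRange_one] at hi hj
    omega) res

theorem pass2_shape (grid res : List (List Int)) :
    (pvPass2 grid res).length = res.length ∧
      ∀ r, ((pvPass2 grid res).getD r []).length = (res.getD r []).length := by
  unfold pvPass2
  exact nestedfold_shape _ _ _ _ _ (by
    intro k hk l hl _
    rw [PySem.List.mem_pyRange_one] at hk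
    rw [PySem.List.mem_pyRange_neg_one] at hl
    omega) res

theorem pass3_shape (grid res : List (List Int)) :
    (pvPass3 grid res).length = res.length ∧
      ∀ r, ((pvPass3 grid res).getD r []).length = (res.getD r []).length := by
  unfold pvPass3
  exact nestedfold_shape _ _ _ _ _ (by
    intro m hm n hn _
    rw [PySem.List.mem_pyRange_neg_one] at hm
    rw [PySem.List.mem_pyRange_one] at hn
    omega) res

theorem pass4_shape (grid res : List (List Int)) :
    (pvPass4 grid res).length = res.length ∧
      ∀ r, ((pvPass4 grid res).getD r []).length = (res.getD r []).length := by
  unfold pvPass4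
  exact nestedfold_shape _ _ _ _ _ (by
    intro o ho p hp _
    rw [PySem.List.mem_pyRange_one] at ho hp
    omega) res

theorem pass1_cell (grid res : List (List Int)) (r c : Nat)
    (_hr : r < grid.length) (hc : c < (grid.getD 0 []).length)
    (h1 : res.length = grid.length) (h2 : (res.getD r []).length = (grid.getD 0 []).length) :
    pvCell (pvPass1 grid res) r c =
      if r + 1 < grid.length ∧ pvCell grid (r + 1) c = 8 then 8 else pvCell res r c := by
  have hnn : ∀ i ∈ PySem.List.pyRange 1 (PySem.List.len grid) 1,
      ∀ j ∈ PySem.List.pyRange 0 (PySem.List.len (PySem.List.pyGetD grid 0 [])) 1,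
        PySem.List.pyGetD (PySem.List.pyGetD grid i []) j 0 = 8 → 0 ≤ i - 1 ∧ 0 ≤ j := by
    intro i hi j hj _
    rw [PySem.List.mem_pyRange_one] at hi hj
    omega
  have key := nestedfold_cell
    (L1 := PySem.List.pyRange 1 (PySem.List.len grid) 1)
    (L2 := PySem.List.pyRange 0 (PySem.List.len (PySem.List.pyGetD grid 0 [])) 1)
    (cond := fun i j => PySem.List.pyGetD (PySem.List.pyGetD grid i []) j 0 = 8)
    (ti := fun i j => i - 1) (tj := fun i j => j)
    (hnn := hnn)
    (res := res) r c
  have hcond : ((∃ i ∈ PySem.List.pyRange 1 (PySem.List.len grid) 1,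
        ∃ j ∈ PySem.List.pyRange 0 (PySem.List.len (PySem.List.pyGetD grid 0 [])) 1,
          PySem.List.pyGetD (PySem.List.pyGetD grid i []) j 0 = 8 ∧ i - 1 = (r : Int) ∧ j = (c : Int)) ∧
        r < res.length ∧ c < (res.getD r []).length)
      ↔ (r + 1 < grid.length ∧ pvCell grid (r + 1) c = 8) := by
    constructor
    · rintro ⟨⟨i, hi, j, hj, h8, hti, htj⟩, -⟩
      rw [PySem.List.mem_pyRange_one, PySem.List.len_eq] at hi
      have hieq : i = ((r + 1 : Nat) : Int) := by push_cast; omega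
      have hjeq : j = ((c : Nat) : Int) := htj
      subst hieq; subst hjeq
      simp only [PySem.List.pyGetD_natCast] at h8
      exact ⟨by exact_mod_cast hi.2, h8⟩
    · rintro ⟨hlt, h8⟩
      refine ⟨⟨((r + 1 : Nat) : Int), ?_, ((c : Nat) : Int), ?_, ?_, by push_cast; ring, rfl⟩,
        by omega, by omega⟩
      · rw [PySem.List.mem_pyRange_one, PySem.List.len_eq]
        constructor <;> [exact_mod_cast Nat.one_le_iff_ne_zero.mpr (by omega); exact_mod_cast hlt]
      · rw [PySem.List.mem_pyRange_one, PySem.List.len_eq, PySem.List.pyGetD_zero]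
        constructor <;> [exact_mod_cast Nat.zero_le c; exact_mod_cast hc]
      · simpa only [PySem.List.pyGetD_natCast] using h8
  exact key.trans (if_congr hcond rfl rfl)

theorem pass2_cell (grid res : List (List Int)) (r c : Nat)
    (hr : r < grid.length) (_hc : c < (grid.getD 0 []).length)
    (h1 : res.length = grid.length) (h2 : (res.getD r []).length = (grid.getD 0 []).length) :
    pvCell (pvPass2 grid res) r c =
      if 0 < c ∧ pvCell grid r (c - 1) = 8 then 8 else pvCell res r c := by
  have hnn : ∀ k ∈ PySem.List.pyRange 0 (PySem.List.len grid) 1,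
      ∀ l ∈ PySem.List.pyRange (PySem.List.len (PySem.List.pyGetD grid 0 []) - 2) (-1) (-1),
        PySem.List.pyGetD (PySem.List.pyGetD grid k []) l 0 = 8 → 0 ≤ k ∧ 0 ≤ l + 1 := by
    intro k hk l hl _
    rw [PySem.List.mem_pyRange_one] at hk
    rw [PySem.List.mem_pyRange_neg_one] at hl
    omega
  have key := nestedfold_cell
    (L1 := PySem.List.pyRange 0 (PySem.List.len grid) 1)
    (L2 := PySem.List.pyRange (PySem.List.len (PySem.List.pyGetD grid 0 []) - 2) (-1) (-1))
    (cond := fun k l => PySem.List.pyGetD (PySem.List.pyGetD grid k []) l 0 = 8)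
    (ti := fun k l => k) (tj := fun k l => l + 1)
    (hnn := hnn)
    (res := res) r c
  have hcond : ((∃ k ∈ PySem.List.pyRange 0 (PySem.List.len grid) 1,
        ∃ l ∈ PySem.List.pyRange (PySem.List.len (PySem.List.pyGetD grid 0 []) - 2) (-1) (-1),
          PySem.List.pyGetD (PySem.List.pyGetD grid k []) l 0 = 8 ∧ k = (r : Int) ∧ l + 1 = (c : Int)) ∧
        r < res.length ∧ c < (res.getD r []).length)
      ↔ (0 < c ∧ pvCell grid r (c - 1) = 8) := by
    constructor
    · rintro ⟨⟨k, hk, l, hl, h8, htk, htl⟩, -⟩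
      rw [PySem.List.mem_pyRange_neg_one] at hl
      have hc0 : 0 < c := by omega
      have hleq : l = ((c - 1 : Nat) : Int) := by omega
      subst htk; subst hleq
      simp only [PySem.List.pyGetD_natCast] at h8
      exact ⟨hc0, h8⟩
    · rintro ⟨hc0, h8⟩
      refine ⟨⟨((r : Nat) : Int), ?_, ((c - 1 : Nat) : Int), ?_, ?_, rfl, by omega⟩,
        by omega, by omega⟩
      · rw [PySem.List.mem_pyRange_one, PySem.List.len_eq]
        constructor <;> [exact_mod_cast Nat.zero_le r; exact_mod_cast hr]
      · rw [PySem.List.mem_pyRange_neg_one, PySem.List.len_eq, PySem.List.pyGetD_zero]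
        constructor <;> omega
      · simpa only [PySem.List.pyGetD_natCast] using h8
  exact key.trans (if_congr hcond rfl rfl)

theorem pass3_cell (grid res : List (List Int)) (r c : Nat)
    (hr : r < grid.length) (hc : c < (grid.getD 0 []).length)
    (h1 : res.length = grid.length) (h2 : (res.getD r []).length = (grid.getD 0 []).length) :
    pvCell (pvPass3 grid res) r c =
      if 0 < r ∧ pvCell grid (r - 1) c = 8 then 8 else pvCell res r c := by
  have hnn : ∀ m ∈ PySem.List.pyRange (PySem.List.len grid - 2) (-1) (-1),
      ∀ n ∈ PySem.List.pyRange 0 (PySem.List.len (PySem.List.pyGetD grid 0 [])) 1,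
        PySem.List.pyGetD (PySem.List.pyGetD grid m []) n 0 = 8 → 0 ≤ m + 1 ∧ 0 ≤ n := by
    intro m hm n hn _
    rw [PySem.List.mem_pyRange_neg_one] at hm
    rw [PySem.List.mem_pyRange_one] at hn
    omega
  have key := nestedfold_cell
    (L1 := PySem.List.pyRange (PySem.List.len grid - 2) (-1) (-1))
    (L2 := PySem.List.pyRange 0 (PySem.List.len (PySem.List.pyGetD grid 0 [])) 1)
    (cond := fun m n => PySem.List.pyGetD (PySem.List.pyGetD grid m []) n 0 = 8)
    (ti := fun m n => m + 1) (tj := fun m n => n)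
    (hnn := hnn)
    (res := res) r c
  have hcond : ((∃ m ∈ PySem.List.pyRange (PySem.List.len grid - 2) (-1) (-1),
        ∃ n ∈ PySem.List.pyRange 0 (PySem.List.len (PySem.List.pyGetD grid 0 [])) 1,
          PySem.List.pyGetD (PySem.List.pyGetD grid m []) n 0 = 8 ∧ m + 1 = (r : Int) ∧ n = (c : Int)) ∧
        r < res.length ∧ c < (res.getD r []).length)
      ↔ (0 < r ∧ pvCell grid (r - 1) c = 8) := by
    constructor
    · rintro ⟨⟨m, hm, n, hn, h8, htm, htn⟩, -⟩
      rw [PySem.List.mem_pyRange_neg_one] at hm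
      have hr0 : 0 < r := by omega
      have hmeq : m = ((r - 1 : Nat) : Int) := by omega
      subst htn; subst hmeq
      simp only [PySem.List.pyGetD_natCast] at h8
      exact ⟨hr0, h8⟩
    · rintro ⟨hr0, h8⟩
      refine ⟨⟨((r - 1 : Nat) : Int), ?_, ((c : Nat) : Int), ?_, ?_, by omega, rfl⟩,
        by omega, by omega⟩
      · rw [PySem.List.mem_pyRange_neg_one, PySem.List.len_eq]
        constructor <;> omega
      · rw [PySem.List.mem_pyRange_one, PySem.List.len_eq, PySem.List.pyGetD_zero]
        constructor <;> [exact_mod_cast Nat.zero_le c; exact_mod_cast hc]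
      · simpa only [PySem.List.pyGetD_natCast] using h8
  exact key.trans (if_congr hcond rfl rfl)

theorem pass4_cell (grid res : List (List Int)) (r c : Nat)
    (hr : r < grid.length) (_hc : c < (grid.getD 0 []).length)
    (h1 : res.length = grid.length) (h2 : (res.getD r []).length = (grid.getD 0 []).length) :
    pvCell (pvPass4 grid res) r c =
      if c + 1 < (grid.getD 0 []).length ∧ pvCell grid r (c + 1) = 8 then 8 else pvCell res r c := by
  have hnn : ∀ o ∈ PySem.List.pyRange 0 (PySem.List.len grid) 1,
      ∀ p ∈ PySem.List.pyRange 1 (PySem.List.len (PySem.List.pyGetD grid 0 [])) 1,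
        PySem.List.pyGetD (PySem.List.pyGetD grid o []) p 0 = 8 → 0 ≤ o ∧ 0 ≤ p - 1 := by
    intro o ho p hp _
    rw [PySem.List.mem_pyRange_one] at ho hp
    omega
  have key := nestedfold_cell
    (L1 := PySem.List.pyRange 0 (PySem.List.len grid) 1)
    (L2 := PySem.List.pyRange 1 (PySem.List.len (PySem.List.pyGetD grid 0 [])) 1)
    (cond := fun o p => PySem.List.pyGetD (PySem.List.pyGetD grid o []) p 0 = 8)
    (ti := fun o p => o) (tj := fun o p => p - 1)
    (hnn := hnn)
    (res := res) r c
  have hcond : ((∃ o ∈ PySem.List.pyRange 0 (PySem.List.len grid) 1,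
        ∃ p ∈ PySem.List.pyRange 1 (PySem.List.len (PySem.List.pyGetD grid 0 [])) 1,
          PySem.List.pyGetD (PySem.List.pyGetD grid o []) p 0 = 8 ∧ o = (r : Int) ∧ p - 1 = (c : Int)) ∧
        r < res.length ∧ c < (res.getD r []).length)
      ↔ (c + 1 < (grid.getD 0 []).length ∧ pvCell grid r (c + 1) = 8) := by
    constructor
    · rintro ⟨⟨o, ho, p, hp, h8, hto, htp⟩, -⟩
      rw [PySem.List.mem_pyRange_one, PySem.List.len_eq, PySem.List.pyGetD_zero] at hp
      have hpeq : p = ((c + 1 : Nat) : Int) := by push_cast; omega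
      subst hto; subst hpeq
      simp only [PySem.List.pyGetD_natCast] at h8
      exact ⟨by exact_mod_cast (by push_cast at hp; omega : ((c : Int) + 1) < ((grid.getD 0 []).length : Int)), h8⟩
    · rintro ⟨hlt, h8⟩
      refine ⟨⟨((r : Nat) : Int), ?_, ((c + 1 : Nat) : Int), ?_, ?_, rfl, by push_cast; ring⟩,
        by omega, by omega⟩
      · rw [PySem.List.mem_pyRange_one, PySem.List.len_eq]
        constructor <;> [exact_mod_cast Nat.zero_le r; exact_mod_cast hr]
      · rw [PySem.List.mem_pyRange_one, PySem.List.len_eq, PySem.List.pyGetD_zero]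
        constructor <;> omega
      · simpa only [PySem.List.pyGetD_natCast] using h8
  exact key.trans (if_congr hcond rfl rfl)

-- ---------- assembled characterization of A ----------

theorem growingColor8_shape (grid : List (List Int)) (hpre : Pre_growingColor8 grid) :
    (growingColor8 grid).length = grid.length ∧
      ∀ r, ((growingColor8 grid).getD r []).length = (grid.getD r []).length := by
  rw [growingColor8_eq, pvGridCopy_eq grid hpre]
  set s1 := pvPass1 grid grid
  set s2 := pvPass2 grid s1
  set s3 := pvPass3 grid s2
  have q1 := pass1_shape grid grid
  have q2 := pass2_shape grid s1
  have q3 := pass3_shape grid s2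
  have q4 := pass4_shape grid s3
  exact ⟨by rw [q4.1, q3.1, q2.1, q1.1],
    fun r => by rw [q4.2 r, q3.2 r, q2.2 r, q1.2 r]⟩

theorem growingColor8_cell (grid : List (List Int)) (hpre : Pre_growingColor8 grid)
    (r c : Nat) (hr : r < grid.length) (hc : c < (grid.getD 0 []).length) :
    pvCell (growingColor8 grid) r c =
      if c + 1 < (grid.getD 0 []).length ∧ pvCell grid r (c + 1) = 8 then 8 else
      if 0 < r ∧ pvCell grid (r - 1) c = 8 then 8 else
      if 0 < c ∧ pvCell grid r (c - 1) = 8 then 8 else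
      if r + 1 < grid.length ∧ pvCell grid (r + 1) c = 8 then 8 else
      pvCell grid r c := by
  rw [growingColor8_eq, pvGridCopy_eq grid hpre]
  have hrowr : (grid.getD r []).length = (grid.getD 0 []).length := pre_rowlen grid hpre r hr
  set s1 := pvPass1 grid grid with hs1
  set s2 := pvPass2 grid s1 with hs2
  set s3 := pvPass3 grid s2 with hs3
  have q1 := pass1_shape grid grid
  have q2 := pass2_shape grid s1
  have q3 := pass3_shape grid s2
  rw [pass4_cell grid s3 r c hr hc (by rw [q3.1, q2.1, q1.1]) (by rw [q3.2 r, q2.2 r, q1.2 r, hrowr]),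
    pass3_cell grid s2 r c hr hc (by rw [q2.1, q1.1]) (by rw [q2.2 r, q1.2 r, hrowr]),
    pass2_cell grid s1 r c hr hc (by rw [q1.1]) (by rw [q1.2 r, hrowr]),
    pass1_cell grid grid r c hr hc rfl hrowr]

-- ---------- characterization of B ----------

theorem alt_shape (grid : List (List Int)) (hne : grid ≠ []) :
    (growingColor8_alt grid).length = grid.length ∧
      ∀ r, r < grid.length → ((growingColor8_alt grid).getD r []).length = (grid.getD 0 []).length := by
  unfold growingColor8_alt
  simp only [PySem.List.len_eq, PySem.List.pyGetD_zero, if_neg hne, PySem.List.pyRange_zero_nat,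
    List.map_map, Function.comp_def]
  constructor
  · simp
  · intro r hrlt
    rw [List.getD_eq_getElem?_getD, List.getElem?_map]
    simp [hrlt]

theorem alt_cell (grid : List (List Int)) (hne : grid ≠ []) (r c : Nat)
    (hr : r < grid.length) (hc : c < (grid.getD 0 []).length) :
    pvCell (growingColor8_alt grid) r c =
      if pvCell grid r c = 8
         ∨ (0 < r ∧ pvCell grid (r - 1) c = 8)
         ∨ (r + 1 < grid.length ∧ pvCell grid (r + 1) c = 8)
         ∨ (0 < c ∧ pvCell grid r (c - 1) = 8)
         ∨ (c + 1 < (grid.getD 0 []).length ∧ pvCell grid r (c + 1) = 8)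
      then 8 else pvCell grid r c := by
  unfold growingColor8_alt
  simp only [PySem.List.len_eq, PySem.List.pyGetD_zero, if_neg hne, PySem.List.pyRange_zero_nat,
    List.map_map, Function.comp_def]
  unfold pvCell
  rw [PySem.List.getD_map_range _ _ _ _ hr, PySem.List.getD_map_range _ _ _ _ hc]
  have e0 : PySem.List.pyGetD (PySem.List.pyGetD grid (r : Int) []) (c : Int) 0
      = (grid.getD r []).getD c 0 := by simp
  have e2 : (0 < (r : Int) ∧ PySem.List.pyGetD (PySem.List.pyGetD grid ((r : Int) - 1) []) (c : Int) 0 = 8)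
      ↔ (0 < r ∧ (grid.getD (r - 1) []).getD c 0 = 8) := by
    constructor
    · rintro ⟨h, h8⟩
      have hr0 : 0 < r := by exact_mod_cast h
      rw [show ((r : Int) - 1) = ((r - 1 : Nat) : Int) by omega] at h8
      simp only [PySem.List.pyGetD_natCast] at h8
      exact ⟨hr0, h8⟩
    · rintro ⟨hr0, h8⟩
      refine ⟨by exact_mod_cast hr0, ?_⟩
      rw [show ((r : Int) - 1) = ((r - 1 : Nat) : Int) by omega]
      simp only [PySem.List.pyGetD_natCast]
      exact h8
  have e3 : ((r : Int) < (grid.length : Int) - 1 ∧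
        PySem.List.pyGetD (PySem.List.pyGetD grid ((r : Int) + 1) []) (c : Int) 0 = 8)
      ↔ (r + 1 < grid.length ∧ (grid.getD (r + 1) []).getD c 0 = 8) := by
    constructor
    · rintro ⟨h, h8⟩
      rw [show ((r : Int) + 1) = ((r + 1 : Nat) : Int) by push_cast; ring] at h8
      simp only [PySem.List.pyGetD_natCast] at h8
      exact ⟨by omega, h8⟩
    · rintro ⟨hlt, h8⟩
      refine ⟨by omega, ?_⟩
      rw [show ((r : Int) + 1) = ((r + 1 : Nat) : Int) by push_cast; ring]
      simp only [PySem.List.pyGetD_natCast]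
      exact h8
  have e4 : (0 < (c : Int) ∧ PySem.List.pyGetD (PySem.List.pyGetD grid (r : Int) []) ((c : Int) - 1) 0 = 8)
      ↔ (0 < c ∧ (grid.getD r []).getD (c - 1) 0 = 8) := by
    constructor
    · rintro ⟨h, h8⟩
      have hc0 : 0 < c := by exact_mod_cast h
      rw [show ((c : Int) - 1) = ((c - 1 : Nat) : Int) by omega] at h8
      simp only [PySem.List.pyGetD_natCast] at h8
      exact ⟨hc0, h8⟩
    · rintro ⟨hc0, h8⟩
      refine ⟨by exact_mod_cast hc0, ?_⟩
      rw [show ((c : Int) - 1) = ((c - 1 : Nat) : Int) by omega]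
      simp only [PySem.List.pyGetD_natCast]
      exact h8
  have e5 : ((c : Int) < ((grid.getD 0 []).length : Int) - 1 ∧
        PySem.List.pyGetD (PySem.List.pyGetD grid (r : Int) []) ((c : Int) + 1) 0 = 8)
      ↔ (c + 1 < (grid.getD 0 []).length ∧ (grid.getD r []).getD (c + 1) 0 = 8) := by
    constructor
    · rintro ⟨h, h8⟩
      rw [show ((c : Int) + 1) = ((c + 1 : Nat) : Int) by push_cast; ring] at h8
      simp only [PySem.List.pyGetD_natCast] at h8
      exact ⟨by omega, h8⟩
    · rintro ⟨hlt, h8⟩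
      refine ⟨by omega, ?_⟩
      rw [show ((c : Int) + 1) = ((c + 1 : Nat) : Int) by push_cast; ring]
      simp only [PySem.List.pyGetD_natCast]
      exact h8
  rw [e0]
  simp only [e2, e3, e4, e5]

-- ---------- main equivalence ----------

theorem growingColor8_main (grid : List (List Int)) (hpre : Pre_growingColor8 grid) :
    growingColor8 grid = growingColor8_alt grid := by
  rcases eq_or_ne grid [] with h | hne
  · subst h; decide
  · have hA := growingColor8_shape grid hpre
    have hB := alt_shape grid hne
    apply List.ext_getElem (by rw [hA.1, hB.1])
    intro r h1 h2
    have hr : r < grid.length := by rw [hA.1] at h1; exact h1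
    have hrowr : (grid.getD r []).length = (grid.getD 0 []).length := pre_rowlen grid hpre r hr
    apply List.ext_getElem
    · rw [← List.getD_eq_getElem _ [] h1, ← List.getD_eq_getElem _ [] h2,
        hA.2 r, hB.2 r hr, hrowr]
    · intro c hc1 hc2
      have hc : c < (grid.getD 0 []).length := by
        have l1 : (growingColor8 grid)[r] = (growingColor8 grid).getD r [] :=
          (List.getD_eq_getElem _ [] h1).symm
        rw [l1, hA.2 r, hrowr] at hc1
        exact hc1
      have lA : pvCell (growingColor8 grid) r c = (growingColor8 grid)[r][c] := by
        unfold pvCell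
        rw [List.getD_eq_getElem _ [] h1, List.getD_eq_getElem _ 0 hc1]
      have lB : pvCell (growingColor8_alt grid) r c = (growingColor8_alt grid)[r][c] := by
        unfold pvCell
        rw [List.getD_eq_getElem _ [] h2, List.getD_eq_getElem _ 0 hc2]
      rw [← lA, ← lB, growingColor8_cell grid hpre r c hr hc, alt_cell grid hne r c hr hc]
      by_cases p1 : c + 1 < (grid.getD 0 []).length ∧ pvCell grid r (c + 1) = 8 <;>
      by_cases p2 : 0 < r ∧ pvCell grid (r - 1) c = 8 <;>
      by_cases p3 : 0 < c ∧ pvCell grid r (c - 1) = 8 <;>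
      by_cases p4 : r + 1 < grid.length ∧ pvCell grid (r + 1) c = 8 <;>
      by_cases p0 : pvCell grid r c = 8 <;>
      simp [p0, p1, p2, p3, p4]

-- ===== VERDICT (by name: the statement is the Claim_ definition above) =====
theorem growingColor8_spec : Claim_equal_growingColor8 := by
  intro grid _ hpre
  unfold Spec_growingColor8
  exact growingColor8_main grid hpre
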